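-- pv_equiv track=rewrite | github.com/jimmy-academia/dev-ADDM | src/addm/tasks/policy_gt.py | is_high_risk_cuisine
-- ===== SOURCE A (Python) =====
-- HIGH_RISK_CUISINES = [
--     "Thai",
--     "Vietnamese",
--     "Chinese",
--     "Asian",
--     "Asian Fusion",
-- ]
--
-- def is_high_risk_cuisine(categories: str) -> bool:
--     """Check if restaurant categories include high-risk cuisines."""
--     if not categories:
--         return False
--     categories_lower = categories.lower()
--     for cuisine in HIGH_RISK_CUISINES:
--         if cuisine.lower() in categories_lower:
--             return True
--     return False
-- ===== SOURCE B (Python) =====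
-- # Single left-to-right scan of the lowered string, testing all five patterns
-- # as prefixes at each position (position-major multi-pattern scan), instead of
-- # five separate substring searches.
-- _HIGH_RISK_LOWER = ["thai", "vietnamese", "chinese", "asian", "asian fusion"]
--
-- def is_high_risk_cuisine(categories: str) -> bool:
--     s = categories.lower()
--     for i in range(len(s)):
--         if any(s.startswith(p, i) for p in _HIGH_RISK_LOWER):
--             return True
--     return False
-- ===== Notes on version B (the rewrite author's own statement) =====
-- stated objective: alternative
-- what changed: Replaces A's pattern-major loop of five independent whole-string substring searches by a single position-major left-to-right scan of the lowered string that tests all five lowered patterns as prefixes at each index.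
import Mathlib
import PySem

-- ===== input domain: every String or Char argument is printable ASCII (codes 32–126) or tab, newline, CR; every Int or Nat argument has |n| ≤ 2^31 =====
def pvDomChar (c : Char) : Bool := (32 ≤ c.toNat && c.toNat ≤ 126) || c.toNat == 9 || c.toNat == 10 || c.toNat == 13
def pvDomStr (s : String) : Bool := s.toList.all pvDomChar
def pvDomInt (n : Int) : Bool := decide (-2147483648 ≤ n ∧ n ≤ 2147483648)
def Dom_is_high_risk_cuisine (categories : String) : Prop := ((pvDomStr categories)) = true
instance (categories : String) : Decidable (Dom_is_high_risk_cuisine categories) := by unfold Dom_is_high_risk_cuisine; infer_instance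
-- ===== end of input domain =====

-- B replaces A's five independent substring searches by one position-major scan; objective: alternative.

-- ===== PORT A =====
def pvHighRiskCuisines : List String := ["Thai", "Vietnamese", "Chinese", "Asian", "Asian Fusion"]

def is_high_risk_cuisine (categories : String) : Bool :=
  if categories == "" then false
  else
    let categoriesLower := PySem.Str.lower categories
    pvHighRiskCuisines.any (fun cuisine =>
      PySem.Str.isIn (PySem.Str.lower cuisine) categoriesLower)

-- ===== PORT B =====
def pvHighRiskLower : List (List Char) :=
  ["thai".toList, "vietnamese".toList, "chinese".toList, "asian".toList, "asian fusion".toList]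

-- the for-i loop of Source B: at each position, test all patterns as prefixes of the suffix
def pvScan : List Char → Bool
  | [] => false
  | c :: rest =>
      (pvHighRiskLower.any (fun p => PySem.Chars.startswith (c :: rest) p)) || pvScan rest

def is_high_risk_cuisine_alt (categories : String) : Bool :=
  pvScan (PySem.Str.lower categories).toList

-- ===== PRECONDITION & SPEC =====
def Spec_is_high_risk_cuisine (categories : String) (out : Bool) : Prop := out = is_high_risk_cuisine_alt categories
instance (categories : String) (out : Bool) : Decidable (Spec_is_high_risk_cuisine categories out) := by unfold Spec_is_high_risk_cuisine; infer_instance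

-- ===== CLAIM (what is proved, stated in full; the proofs are below) =====
def Claim_equal_is_high_risk_cuisine : Prop := ∀ (categories : String), Dom_is_high_risk_cuisine categories → Spec_is_high_risk_cuisine categories (is_high_risk_cuisine categories)

-- ===== LEMMAS AND PROOFS =====

theorem pv_any_or {α : Type} (l : List α) (f g : α → Bool) :
    l.any (fun x => f x || g x) = (l.any f || l.any g) := by
  rw [Bool.eq_iff_iff]
  simp only [List.any_eq_true, Bool.or_eq_true]
  constructor
  · rintro ⟨x, hx, h | h⟩
    · exact Or.inl ⟨x, hx, h⟩
    · exact Or.inr ⟨x, hx, h⟩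
  · rintro (⟨x, hx, h⟩ | ⟨x, hx, h⟩)
    · exact ⟨x, hx, Or.inl h⟩
    · exact ⟨x, hx, Or.inr h⟩

theorem pv_isIn_cons (p : List Char) (c : Char) (rest : List Char) :
    PySem.Chars.isIn p (c :: rest) =
      (PySem.Chars.startswith (c :: rest) p || PySem.Chars.isIn p rest) := by
  rw [Bool.eq_iff_iff]
  simp only [Bool.or_eq_true, PySem.Chars.startswith_iff,
    ← PySem.Chars.exists_prefix_drop_iff_isIn]
  constructor
  · rintro ⟨j, hj⟩
    cases j with
    | zero => exact Or.inl hj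
    | succ j => exact Or.inr ⟨j, by simpa using hj⟩
  · rintro (h | ⟨j, hj⟩)
    · exact ⟨0, h⟩
    · exact ⟨j + 1, by simpa using hj⟩

theorem pv_scan_eq (l : List Char) :
    pvScan l = pvHighRiskLower.any (fun p => PySem.Chars.isIn p l) := by
  induction l with
  | nil => decide
  | cons c rest ih =>
    simp only [pvScan, ih, pv_isIn_cons, pv_any_or]

-- ===== VERDICT (by name: the statement is the Claim_ definition above) =====
theorem is_high_risk_cuisine_spec : Claim_equal_is_high_risk_cuisine := by
  intro categories _
  unfold Spec_is_high_risk_cuisine is_high_risk_cuisine is_high_risk_cuisine_alt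
  by_cases h : categories = ""
  · subst h; decide
  · simp only [beq_iff_eq, h, if_false]
    rw [pv_scan_eq]
    rfl
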